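-- pv_equiv track=rewrite | github.com/MetamorphicAgg/MAgg | NeuroSAT/src/trans.py | idxs2clause
-- ===== SOURCE A (Python) =====
-- def idxs2clause(L_unpack_indices, n_vars):
--     iclauses = []
--     cur_clause = []
--     cur_clause_id = None
--     for var_id, clause_id in L_unpack_indices:
--         if clause_id != cur_clause_id:
--             if len(cur_clause):
--                 iclauses.append(cur_clause)
--             cur_clause = []
--             cur_clause_id = clause_id
--
--         v_id = (var_id % n_vars) + 1
--         v_sign = 1 if var_id < n_vars else -1
--         cur_clause.append(v_sign * v_id)
--     if len(cur_clause):
--         iclauses.append(cur_clause)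
--     return iclauses
-- ===== SOURCE B (Python) =====
-- def idxs2clause(L_unpack_indices, n_vars):
--     def lit(v):
--         return (v % n_vars + 1) if v < n_vars else -(v % n_vars + 1)
--     iclauses = []
--     i = 0
--     n = len(L_unpack_indices)
--     while i < n:
--         cid = L_unpack_indices[i][1]
--         j = i
--         while j < n and L_unpack_indices[j][1] == cid:
--             j += 1
--         iclauses.append([lit(v) for v, _ in L_unpack_indices[i:j]])
--         i = j
--     return iclauses
-- ===== Notes on version B (the rewrite author's own statement) =====
-- stated objective: alternative
-- what changed: Replaces A's running cur_clause/cur_clause_id accumulator with a two-stage shape: a two-pointer scan that finds each maximal run of equal clause_ids and maps the run to literals in one comprehension.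
import Mathlib
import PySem

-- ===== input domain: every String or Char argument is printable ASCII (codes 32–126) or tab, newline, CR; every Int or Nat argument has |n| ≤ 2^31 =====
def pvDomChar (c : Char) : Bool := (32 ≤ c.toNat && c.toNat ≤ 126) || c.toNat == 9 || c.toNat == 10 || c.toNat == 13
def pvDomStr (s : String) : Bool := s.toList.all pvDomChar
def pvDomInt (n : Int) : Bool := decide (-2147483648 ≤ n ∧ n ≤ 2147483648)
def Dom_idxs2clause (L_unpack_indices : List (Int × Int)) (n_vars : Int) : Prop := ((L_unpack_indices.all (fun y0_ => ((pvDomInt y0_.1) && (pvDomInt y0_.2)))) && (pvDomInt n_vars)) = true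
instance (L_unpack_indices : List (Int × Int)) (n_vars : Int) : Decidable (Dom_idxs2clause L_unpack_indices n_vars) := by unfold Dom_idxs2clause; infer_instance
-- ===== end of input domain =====

-- B groups consecutive equal clause_ids by a run-finding scan and then maps each run
-- to literals, instead of A's running accumulator; alternative decomposition, same cost.

-- ===== PORT A =====
-- state: (iclauses, cur_clause, cur_clause_id)
def idxs2clauseStep (n_vars : Int) (st : List (List Int) × List Int × Option Int)
    (p : Int × Int) : List (List Int) × List Int × Option Int :=
  let (ic, cur, cid) := st
  let (ic, cur, cid) :=
    if some p.2 ≠ cid then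
      ((if cur.length ≠ 0 then ic ++ [cur] else ic), ([] : List Int), some p.2)
    else (ic, cur, cid)
  let v_id := PySem.Int.mod p.1 n_vars + 1
  let v_sign : Int := if p.1 < n_vars then 1 else -1
  (ic, cur ++ [v_sign * v_id], cid)

def idxs2clause (L_unpack_indices : List (Int × Int)) (n_vars : Int) : List (List Int) :=
  let s := L_unpack_indices.foldl (idxs2clauseStep n_vars) ([], [], none)
  if s.2.1.length ≠ 0 then s.1 ++ [s.2.1] else s.1

-- ===== PORT B =====
def litB (n_vars v : Int) : Int :=
  if v < n_vars then PySem.Int.mod v n_vars + 1 else -(PySem.Int.mod v n_vars + 1)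

-- run-finding scan: take the maximal run of the head's clause_id, map it, recurse on the rest
def idxs2clause_alt (L_unpack_indices : List (Int × Int)) (n_vars : Int) : List (List Int) :=
  match L_unpack_indices with
  | [] => []
  | (v, c) :: rest =>
    (litB n_vars v :: (rest.takeWhile (fun p => p.2 == c)).map (fun p => litB n_vars p.1))
      :: idxs2clause_alt (rest.dropWhile (fun p => p.2 == c)) n_vars
termination_by L_unpack_indices.length
decreasing_by
  simp only [List.length_cons]
  exact Nat.lt_succ_of_le (List.length_dropWhile_le _ _)

-- ===== PRECONDITION & SPEC =====
-- Pre_ excludes exactly the inputs where Python A raises ZeroDivisionError (n_vars = 0 with a nonempty list).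
def Pre_idxs2clause (L_unpack_indices : List (Int × Int)) (n_vars : Int) : Prop :=
  n_vars ≠ 0 ∨ L_unpack_indices = []
instance (L_unpack_indices : List (Int × Int)) (n_vars : Int) : Decidable (Pre_idxs2clause L_unpack_indices n_vars) := by unfold Pre_idxs2clause; infer_instance
def pvWitness_idxs2clause : (List (Int × Int)) × Int := ([(0, 0), (3, 0), (1, 1)], 2)

def Spec_idxs2clause (L_unpack_indices : List (Int × Int)) (n_vars : Int) (out : List (List Int)) : Prop := out = idxs2clause_alt L_unpack_indices n_vars
instance (L_unpack_indices : List (Int × Int)) (n_vars : Int) (out : List (List Int)) : Decidable (Spec_idxs2clause L_unpack_indices n_vars out) := by unfold Spec_idxs2clause; infer_instance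

-- ===== CLAIM (what is proved, stated in full; the proofs are below) =====
def Claim_equal_idxs2clause : Prop := ∀ (L_unpack_indices : List (Int × Int)) (n_vars : Int), Dom_idxs2clause L_unpack_indices n_vars → Pre_idxs2clause L_unpack_indices n_vars → Spec_idxs2clause L_unpack_indices n_vars (idxs2clause L_unpack_indices n_vars)

-- ===== LEMMAS AND PROOFS =====

-- A's per-element value equals B's literal function
theorem step_lit (n v : Int) :
    (if v < n then PySem.Int.mod v n + 1 else -1 + -PySem.Int.mod v n) = litB n v := by
  unfold litB; split <;> ring

-- invariant: folding A's step from a mid-run state (cur ≠ [], cid = some c)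
theorem fold_invariant (n : Int) (L : List (Int × Int)) :
    ∀ (ic : List (List Int)) (cur : List Int) (c : Int), cur ≠ [] →
    (let s := L.foldl (idxs2clauseStep n) (ic, cur, some c)
     if s.2.1.length ≠ 0 then s.1 ++ [s.2.1] else s.1) =
    ic ++ (cur ++ (L.takeWhile (fun p => p.2 == c)).map (fun p => litB n p.1))
      :: idxs2clause_alt (L.dropWhile (fun p => p.2 == c)) n := by
  induction L with
  | nil =>
    intro ic cur c hcur
    simp [idxs2clause_alt, List.length_eq_zero_iff, hcur]
  | cons p rest ih =>
    intro ic cur c hcur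
    obtain ⟨v, cc⟩ := p
    by_cases hc : cc = c
    · subst hc
      have hstep : idxs2clauseStep n (ic, cur, some cc) (v, cc) =
          (ic, cur ++ [litB n v], some cc) := by
        simp [idxs2clauseStep]
        exact step_lit n v
      rw [List.foldl_cons, hstep, ih ic (cur ++ [litB n v]) cc (by simp)]
      simp [List.takeWhile_cons, List.dropWhile_cons]
    · have hstep : idxs2clauseStep n (ic, cur, some c) (v, cc) =
          (ic ++ [cur], [litB n v], some cc) := by
        simp [idxs2clauseStep, hc, List.length_eq_zero_iff, hcur]
        exact step_lit n v
      rw [List.foldl_cons, hstep]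
      have := ih (ic ++ [cur]) [litB n v] cc (by simp)
      have hne : ((v, cc).2 == c) = false := by simp [hc]
      simp only [List.takeWhile, List.dropWhile, hne] at *
      rw [this, idxs2clause_alt]
      simp

-- ===== VERDICT (by name: the statement is the Claim_ definition above) =====
theorem idxs2clause_spec : Claim_equal_idxs2clause := by
  intro L n _ _
  unfold Spec_idxs2clause idxs2clause
  cases L with
  | nil => simp [idxs2clause_alt]
  | cons p rest =>
    obtain ⟨v, c⟩ := p
    have hstep : idxs2clauseStep n ([], [], none) (v, c) =
        ([], [litB n v], some c) := by
      simp [idxs2clauseStep]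
      exact step_lit n v
    rw [List.foldl_cons, hstep]
    have := fold_invariant n rest [] [litB n v] c (by simp)
    simp only at this
    rw [this, idxs2clause_alt]
    simp
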